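-- pv_equiv track=rewrite | github.com/krishanu-2001/OS-Evolve | results/shinka_circle_packing/2025.11.02195019_example/gen_91/original.py | _generate_hex_row_combinations
-- ===== SOURCE A (Python) =====
-- from typing import Callable, List, Tuple
--
-- def _generate_hex_row_combinations(n: int) -> List[List[int]]:
--     results = []
--     def backtrack(sofar,left,rows_left):
--         if rows_left==1:
--             if left>=1:
--                 cand = sofar+[left]
--                 if max(cand)-min(cand)<=2 and max(cand)>=4:
--                     results.append(cand)
--             return
--         for v in range(1,left-rows_left+2):
--             backtrack(sofar+[v],left-v,rows_left-1)
--     for R in range(4,7):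
--         backtrack([],n,R)
--     # unique & sorted by (range, -max)
--     uniq = {tuple(sorted(r)): r for r in results}
--     combos = list(uniq.values())
--     combos.sort(key=lambda r:(max(r)-min(r), -max(r)))
--     return combos
-- ===== SOURCE B (Python) =====
-- def _generate_hex_row_combinations(n):
--     # Direct O(1) enumeration: a valid row multiset uses values in a window
--     # {m, m+1, m+2} with min m (count a>=1), so only ~3 candidate m per row
--     # count R.  Emit each multiset once, arranged descending (which is what
--     # A's dict keeps), in A's first-occurrence order (R asc, then ascending
--     # arrangement lex order = m asc, a desc); final stable sort is the same.
--     combos = []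
--     for R in range(4, 7):
--         lo = max(2, -((2 * (R - 1) - n) // R))   # ceil((n-2(R-1))/R), and m>=2
--         hi = n // R
--         for m in range(lo, hi + 1):
--             s = n - m * R            # = b + 2c where b,c = counts of m+1, m+2
--             for a in range(R, 0, -1):
--                 c = s - (R - a)
--                 b = 2 * (R - a) - s
--                 if b < 0 or c < 0:
--                     continue
--                 mx = m + 2 if c > 0 else (m + 1 if b > 0 else m)
--                 if mx < 4:
--                     continue
--                 combos.append([m + 2] * c + [m + 1] * b + [m] * a)
--     combos.sort(key=lambda r: (max(r) - min(r), -max(r)))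
--     return combos
-- ===== Notes on version B (the rewrite author's own statement) =====
-- stated objective: faster
-- what changed: A enumerates every composition of n into four to six positive parts by backtracking (quintic work) and then deduplicates via a dict keyed by the sorted tuple; B derives each valid row multiset directly from its minimum value m and the count of m (the values can only span three consecutive integers, so only a constant few candidate m per row count), emitting each multiset once in descending arrangement in exactly A's dict first-occurrence order, then applies the same stable sort.
import Mathlib
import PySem

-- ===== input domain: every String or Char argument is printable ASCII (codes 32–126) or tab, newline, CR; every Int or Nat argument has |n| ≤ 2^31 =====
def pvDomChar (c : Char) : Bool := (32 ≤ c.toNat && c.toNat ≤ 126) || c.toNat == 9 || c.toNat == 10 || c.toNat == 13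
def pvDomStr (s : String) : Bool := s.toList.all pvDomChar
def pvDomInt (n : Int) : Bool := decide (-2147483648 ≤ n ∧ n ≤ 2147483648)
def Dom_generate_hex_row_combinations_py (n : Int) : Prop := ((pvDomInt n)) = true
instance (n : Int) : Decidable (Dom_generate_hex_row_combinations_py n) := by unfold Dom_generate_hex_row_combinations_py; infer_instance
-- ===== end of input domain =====

-- B replaces A's enumeration of all O(n^5) compositions followed by dict dedup with a
-- direct O(1) enumeration of the ≤ 3-consecutive-value row multisets, emitted descending
-- in A's first-occurrence order; same return value (objective: faster, asymptotic).

-- ===== PORT A =====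

-- max(xs) / min(xs) on a NONEMPTY list (every use below is on sofar+[left], nonempty)
def pvMax (xs : List Int) : Int := (PySem.List.max? xs (fun x => x)).getD 0
def pvMin (xs : List Int) : Int := (PySem.List.min? xs (fun x => x)).getD 0
-- 'max(cand)-min(cand)<=2 and max(cand)>=4'
def pvOk (cand : List Int) : Bool := decide (pvMax cand - pvMin cand ≤ 2 ∧ 4 ≤ pvMax cand)
-- 'tuple(sorted(r))'
def pvKey (r : List Int) : List Int := PySem.List.sorted r (fun x => x) false

-- 'def backtrack(sofar,left,rows_left)' — rows_left is ported as a Nat because A only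
-- ever calls it with rows_left ∈ {4,5,6} decreasing to 1 (the 0 case is unreachable).
def pvBacktrack : Nat → List Int → Int → List (List Int) → List (List Int)
  | 0, _, _, results => results
  | 1, sofar, left, results =>
      if 1 ≤ left then
        let cand := sofar ++ [left]
        if pvOk cand then results ++ [cand] else results
      else results
  | (k+2), sofar, left, results =>
      (PySem.List.pyRange 1 (left - ((k : Int) + 2) + 2) 1).foldl
        (fun results v => pvBacktrack (k+1) (sofar ++ [v]) (left - v) results) results

def generate_hex_row_combinations_py (n : Int) : List (List Int) :=
  let results := (PySem.List.pyRange 4 7 1).foldl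
    (fun results R => pvBacktrack R.toNat [] n results) []
  let uniq : PySem.Dict (List Int) (List Int) :=
    results.foldl (fun d r => d.insert (pvKey r) r) PySem.Dict.empty
  let combos := uniq.values
  PySem.List.sorted2 combos (fun r => pvMax r - pvMin r) (fun r => -(pvMax r)) false

-- ===== PORT B =====
def generate_hex_row_combinations_py_alt (n : Int) : List (List Int) :=
  let combos := (PySem.List.pyRange 4 7 1).foldl (fun combos R =>
      let lo := max 2 (-(PySem.Int.floordiv (2*(R-1) - n) R))
      let hi := PySem.Int.floordiv n R
      (PySem.List.pyRange lo (hi+1) 1).foldl (fun combos m =>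
        let s := n - m * R
        (PySem.List.pyRange R 0 (-1)).foldl (fun combos a =>
          let c := s - (R - a)
          let b := 2*(R - a) - s
          if b < 0 ∨ c < 0 then combos
          else
            let mx := if 0 < c then m+2 else if 0 < b then m+1 else m
            if mx < 4 then combos
            else combos ++ [List.replicate c.toNat (m+2) ++ List.replicate b.toNat (m+1) ++ List.replicate a.toNat m]
        ) combos
      ) combos
    ) []
  PySem.List.sorted2 combos (fun r => pvMax r - pvMin r) (fun r => -(pvMax r)) false

-- ===== PRECONDITION & SPEC =====
def Spec_generate_hex_row_combinations_py (n : Int) (out : List (List Int)) : Prop := out = generate_hex_row_combinations_py_alt n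
instance (n : Int) (out : List (List Int)) : Decidable (Spec_generate_hex_row_combinations_py n out) := by unfold Spec_generate_hex_row_combinations_py; infer_instance

-- ===== CLAIM (what is proved, stated in full; the proofs are below) =====
def Claim_equal_generate_hex_row_combinations_py : Prop := ∀ (n : Int), Dom_generate_hex_row_combinations_py n → Spec_generate_hex_row_combinations_py n (generate_hex_row_combinations_py n)

-- ===== LEMMAS AND PROOFS =====

-- ---------- proof-side vocabulary ----------

-- ascending / descending arrangement of the multiset {m×a, (m+1)×b, (m+2)×c}
def pvAsc (m : Int) (a b c : Nat) : List Int :=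
  List.replicate a m ++ List.replicate b (m+1) ++ List.replicate c (m+2)
def pvDesc (m : Int) (a b c : Nat) : List Int :=
  List.replicate c (m+2) ++ List.replicate b (m+1) ++ List.replicate a m

-- what B's innermost loop body appends
def pvEmit (n R m a : Int) : List (List Int) :=
  if 2*(R - a) - (n - m * R) < 0 ∨ (n - m * R) - (R - a) < 0 then []
  else if (if 0 < (n - m * R) - (R - a) then m+2 else if 0 < 2*(R - a) - (n - m * R) then m+1 else m) < 4 then []
  else [pvDesc m a.toNat (2*(R - a) - (n - m * R)).toNat ((n - m * R) - (R - a)).toNat]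

def pvLo (n R : Int) : Int := max 2 (-(PySem.Int.floordiv (2*(R-1) - n) R))
def pvHi (n R : Int) : Int := PySem.Int.floordiv n R

-- B's per-R output block
def pvW (n R : Int) : List (List Int) :=
  (PySem.List.pyRange (pvLo n R) (pvHi n R + 1) 1).flatMap (fun m =>
    (PySem.List.pyRange R 0 (-1)).flatMap (fun a => pvEmit n R m a))

-- the lex-ordered composition enumeration underlying A's backtrack
def pvComps (left : Int) : Nat → List (List Int)
  | 0 => []
  | 1 => if 1 ≤ left then [[left]] else []
  | (k+2) => (PySem.List.pyRange 1 (left - ((k : Int) + 2) + 2) 1).flatMap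
      (fun v => (pvComps (left - v) (k+1)).map (v :: ·))

def pvF (n : Int) (k : Nat) : List (List Int) := (pvComps n k).filter pvOk

-- the 'last value inserted under key kk' fold
def pvPick (kk : List Int) (acc : List Int) (r : List Int) : List Int :=
  if pvKey r = kk then r else acc

-- ---------- generic list lemmas ----------

lemma pv_foldl_emit {α β : Type} (body : List β → α → List β) (emit : α → List β)
    (h : ∀ acc x, body acc x = acc ++ emit x) :
    ∀ (l : List α) (acc : List β), l.foldl body acc = acc ++ l.flatMap emit := by
  intro l
  induction l with
  | nil => intro acc; simp
  | cons x t ih =>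
      intro acc
      simp only [List.foldl_cons, List.flatMap_cons, h, ih, List.append_assoc]


lemma pv_pairwise_flatMap {α β : Type} (vs : List α) (g : α → List β)
    (P : α → α → Prop) (Q : β → β → Prop)
    (hvs : vs.Pairwise P) (hin : ∀ v ∈ vs, (g v).Pairwise Q)
    (hcross : ∀ v ∈ vs, ∀ w ∈ vs, P v w → ∀ x ∈ g v, ∀ y ∈ g w, Q x y) :
    (vs.flatMap g).Pairwise Q := by
  induction vs with
  | nil => simp
  | cons v vt ih =>
      simp only [List.flatMap_cons, List.pairwise_append]
      rcases List.pairwise_cons.mp hvs with ⟨hv, hvt⟩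
      refine ⟨hin v (by simp), ih hvt (fun w hw => hin w (by simp [hw]))
        (fun v' hv' w' hw' hp => hcross v' (by simp [hv']) w' (by simp [hw']) hp), ?_⟩
      intro x hx y hy
      rcases List.mem_flatMap.mp hy with ⟨w, hw, hyw⟩
      exact hcross v (by simp) w (by simp [hw]) (hv w hw) x hx y hyw

lemma pv_length_le_sum : ∀ (t : List Int), (∀ x ∈ t, 1 ≤ x) → (t.length : Int) ≤ t.sum := by
  intro t
  induction t with
  | nil => simp
  | cons x s ih =>
      intro h
      have h1 := h x (by simp)
      have h2 := ih (fun y hy => h y (by simp [hy]))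
      simp only [List.length_cons, List.sum_cons]
      push_cast
      omega


lemma pv_append_lt_append_iff (p : List Int) (u v : List Int) : p ++ u < p ++ v ↔ u < v := by
  induction p with
  | nil => simp
  | cons x q ih => simp [List.cons_lt_cons_iff, ih]


-- ---------- pick-fold lemmas ----------

lemma pv_pick_no_match (kk : List Int) :
    ∀ (l : List (List Int)) (init : List Int), (∀ r ∈ l, pvKey r ≠ kk) →
      l.foldl (pvPick kk) init = init := by
  intro l
  induction l with
  | nil => intro init _; rfl
  | cons r t ih =>
      intro init h
      have hr : pvKey r ≠ kk := h r (by simp)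
      simp only [List.foldl_cons, pvPick, if_neg hr]
      exact ih init (fun r' hr' => h r' (by simp [hr']))


lemma pv_pick_last (kk : List Int) :
    ∀ (l : List (List Int)), l.Pairwise (· < ·) →
    ∀ x, x ∈ l → pvKey x = kk → (∀ r ∈ l, pvKey r = kk → r ≤ x) →
    ∀ init, l.foldl (pvPick kk) init = x := by
  intro l
  induction l with
  | nil => intro _ x hx; exact absurd hx (by simp)
  | cons y t ih =>
      intro hp x hx hkey hbound init
      rcases List.pairwise_cons.mp hp with ⟨hy, ht⟩
      simp only [List.foldl_cons]
      rcases List.mem_cons.mp hx with hxy | hxt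
      · subst hxy
        have hnom : ∀ r ∈ t, pvKey r ≠ kk := by
          intro r hr hkr
          have h1 : r ≤ x := hbound r (by simp [hr]) hkr
          have h2 : x < r := hy r hr
          exact absurd h1 (not_le.mpr h2)
        rw [pv_pick_no_match kk t _ hnom]
        simp [pvPick, hkey]
      · exact ih ht x hxt hkey (fun r hr hkr => hbound r (by simp [hr]) hkr) _


lemma pv_pick_filter (kk k1 : List Int) (hne : kk ≠ k1) :
    ∀ (l : List (List Int)) (init : List Int),
      (l.filter (fun r => decide (pvKey r ≠ k1))).foldl (pvPick kk) init
        = l.foldl (pvPick kk) init := by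
  intro l
  induction l with
  | nil => intro init; rfl
  | cons r t ih =>
      intro init
      by_cases h : pvKey r = k1
      · have hdrop : List.filter (fun r => decide (pvKey r ≠ k1)) (r :: t)
            = List.filter (fun r => decide (pvKey r ≠ k1)) t := by
          simp [List.filter_cons, h]
        have hpick : pvPick kk init r = init := by
          unfold pvPick; rw [h, if_neg (Ne.symm hne)]
        rw [hdrop, ih, List.foldl_cons, hpick]
      · have hkeep : List.filter (fun r => decide (pvKey r ≠ k1)) (r :: t)
            = r :: List.filter (fun r => decide (pvKey r ≠ k1)) t := by
          simp [List.filter_cons, h]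
        rw [hkeep, List.foldl_cons, List.foldl_cons, ih]


lemma pv_getD_insert_fold :
    ∀ (l : List (List Int)) (d : PySem.Dict (List Int) (List Int)) (kk dflt : List Int),
      (l.foldl (fun d r => d.insert (pvKey r) r) d).getD kk dflt
        = l.foldl (pvPick kk) (d.getD kk dflt) := by
  intro l
  induction l with
  | nil => intro d kk dflt; rfl
  | cons r t ih =>
      intro d kk dflt
      simp only [List.foldl_cons, ih]
      congr 1
      rw [PySem.Dict.getD_insert]
      simp only [pvPick]
      by_cases h : pvKey r = kk
      · simp [h]
      · have h2 : ¬ (kk = pvKey r) := fun hh => h hh.symm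
        simp [h, h2]


-- ---------- dedup lemmas ----------

lemma pv_foldl_add_mem (x : List Int) :
    ∀ (ys : List (List Int)) (s : List (List Int)), x ∈ s →
      ys.foldl PySem.Set.add s = (ys.filter (fun y => decide (y ≠ x))).foldl PySem.Set.add s := by
  intro ys
  induction ys with
  | nil => intro s _; rfl
  | cons y t ih =>
      intro s hs
      by_cases h : y = x
      · subst h
        simpa [List.filter_cons, PySem.Set.add, PySem.Set.contains, hs] using ih s hs
      · have hmem : x ∈ PySem.Set.add s y := by
          simp only [PySem.Set.add]
          split <;> simp [hs]
        simp [List.filter_cons, h, ih _ hmem]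


lemma pv_foldl_add_append :
    ∀ (ys s t : List (List Int)), (∀ y ∈ ys, y ∉ s) →
      ys.foldl PySem.Set.add (s ++ t) = s ++ ys.foldl PySem.Set.add t := by
  intro ys
  induction ys with
  | nil => intro s t _; rfl
  | cons y yt ih =>
      intro s t h
      have hy : y ∉ s := h y (by simp)
      have : PySem.Set.add (s ++ t) y = s ++ PySem.Set.add t y := by
        by_cases hyt : y ∈ t
        · simp [PySem.Set.add, PySem.Set.contains, hy, hyt]
        · simp [PySem.Set.add, PySem.Set.contains, hy, hyt]
      simp only [List.foldl_cons, this]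
      exact ih s _ (fun z hz => h z (by simp [hz]))


lemma pv_dedup_cons (x : List Int) (xs : List (List Int)) :
    PySem.List.dedup (x :: xs) = x :: PySem.List.dedup (xs.filter (fun y => decide (y ≠ x))) := by
  rw [PySem.List.dedup_eq_ofList, PySem.List.dedup_eq_ofList]
  show List.foldl PySem.Set.add PySem.Set.empty (x :: xs)
      = x :: List.foldl PySem.Set.add PySem.Set.empty _
  have h0 : PySem.Set.add PySem.Set.empty x = [x] := by rfl
  simp only [List.foldl_cons, h0]
  rw [pv_foldl_add_mem x xs [x] (by simp)]
  have := pv_foldl_add_append (xs.filter (fun y => decide (y ≠ x))) [x] []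
    (by intro y hy; simp at hy; simp [hy.2])
  simpa using this


lemma pv_dedup_append (xs ys : List (List Int)) (h : ∀ y ∈ ys, y ∉ xs) :
    PySem.List.dedup (xs ++ ys) = PySem.List.dedup xs ++ PySem.List.dedup ys := by
  rw [PySem.List.dedup_eq_ofList, PySem.List.dedup_eq_ofList, PySem.List.dedup_eq_ofList]
  show List.foldl PySem.Set.add PySem.Set.empty (xs ++ ys)
      = List.foldl PySem.Set.add PySem.Set.empty xs ++ _
  rw [List.foldl_append]
  have hdis : ∀ y ∈ ys, y ∉ List.foldl PySem.Set.add PySem.Set.empty xs := by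
    intro y hy hmem
    have : y ∈ xs := by
      have := PySem.List.mem_dedup (x := y) (xs := xs)
      rw [PySem.List.dedup_eq_ofList] at this
      exact this.mp hmem
    exact h y hy this
  have := pv_foldl_add_append ys (List.foldl PySem.Set.add PySem.Set.empty xs) [] hdis
  simpa using this


-- ---------- lex bounds of a permutation class ----------

lemma pv_cons_le_cons (a : Int) {l1 l2 : List Int} (h : l1 ≤ l2) : a :: l1 ≤ a :: l2 := by
  rw [← Std.not_lt] at h ⊢
  intro hc
  rcases List.cons_lt_cons_iff.mp hc with h1 | ⟨_, h1⟩
  · exact lt_irrefl a h1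
  · exact h h1

lemma pv_sorted_le_perm : ∀ (s r : List Int), s.Perm r → s.Pairwise (· ≤ ·) → s ≤ r := by
  intro s
  induction s with
  | nil =>
      intro r hperm _
      have : r = [] := hperm.symm.eq_nil
      subst this; exact le_refl _
  | cons y st ih =>
      intro r hperm hpair
      rcases List.pairwise_cons.mp hpair with ⟨hy, hst⟩
      cases r with
      | nil => exact absurd hperm.symm (by simp)
      | cons x rt =>
          have hx : x ∈ (y :: st) := hperm.symm.subset (show x ∈ x :: rt by simp)
          have hyx : y ≤ x := by
            rcases List.mem_cons.mp hx with h | h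
            · exact le_of_eq h.symm
            · exact hy x h
          rcases lt_or_eq_of_le hyx with hlt | heq
          · exact le_of_lt (List.cons_lt_cons_iff.mpr (Or.inl hlt))
          · subst heq
            have hperm' : st.Perm rt := List.Perm.cons_inv hperm
            exact pv_cons_le_cons _ (ih rt hperm' hst)


lemma pv_perm_le_desc : ∀ (s r : List Int), s.Perm r → s.Pairwise (fun x y => y ≤ x) → r ≤ s := by
  intro s
  induction s with
  | nil =>
      intro r hperm _
      have : r = [] := hperm.symm.eq_nil
      subst this; exact le_refl _
  | cons y st ih =>
      intro r hperm hpair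
      rcases List.pairwise_cons.mp hpair with ⟨hy, hst⟩
      cases r with
      | nil => exact absurd hperm (by simp)
      | cons x rt =>
          have hx : x ∈ (y :: st) := hperm.symm.subset (show x ∈ x :: rt by simp)
          have hxy : x ≤ y := by
            rcases List.mem_cons.mp hx with h | h
            · exact le_of_eq h
            · exact hy x h
          rcases lt_or_eq_of_le hxy with hlt | heq
          · exact le_of_lt (List.cons_lt_cons_iff.mpr (Or.inl hlt))
          · subst heq
            have hperm' : st.Perm rt := List.Perm.cons_inv hperm
            exact pv_cons_le_cons _ (ih rt hperm' hst)


-- ---------- min/max characterizations ----------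

lemma pv_max_eq (s : List Int) (x : Int) (hx : x ∈ s) (hmax : ∀ y ∈ s, y ≤ x) : pvMax s = x := by
  have hne : s ≠ [] := by rintro rfl; simp at hx
  obtain ⟨m', hm'⟩ : ∃ m', PySem.List.max? s (fun x => x) = some m' := by
    cases h : PySem.List.max? s (fun x => x) with
    | none => exact absurd ((PySem.List.max?_eq_none_iff s _).mp h) hne
    | some m' => exact ⟨m', rfl⟩
  have h1 : m' ∈ s := PySem.List.max?_mem hm'
  have h2 : x ≤ m' := PySem.List.max?_isMax hm' x hx
  have h3 : m' ≤ x := hmax m' h1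
  simp [pvMax, hm']
  omega


lemma pv_min_eq (s : List Int) (x : Int) (hx : x ∈ s) (hmin : ∀ y ∈ s, x ≤ y) : pvMin s = x := by
  have hne : s ≠ [] := by rintro rfl; simp at hx
  obtain ⟨m', hm'⟩ : ∃ m', PySem.List.min? s (fun x => x) = some m' := by
    cases h : PySem.List.min? s (fun x => x) with
    | none => exact absurd ((PySem.List.min?_eq_none_iff s _).mp h) hne
    | some m' => exact ⟨m', rfl⟩
  have h1 : m' ∈ s := PySem.List.min?_mem hm'
  have h2 : m' ≤ x := PySem.List.min?_isMin hm' x hx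
  have h3 : x ≤ m' := hmin m' h1
  simp [pvMin, hm']
  omega


-- ---------- pvAsc structure ----------


lemma pv_reverse_asc (m : Int) (a b c : Nat) : (pvAsc m a b c).reverse = pvDesc m a b c := by
  simp [pvAsc, pvDesc, List.reverse_append, List.reverse_replicate, List.append_assoc]

lemma pv_asc_perm_desc (m : Int) (a b c : Nat) : (pvAsc m a b c).Perm (pvDesc m a b c) := by
  rw [← pv_reverse_asc]
  exact (List.reverse_perm _).symm


lemma pv_asc_pairwise_le (m : Int) (a b c : Nat) : (pvAsc m a b c).Pairwise (· ≤ ·) := by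
  unfold pvAsc
  refine List.pairwise_append.mpr ⟨List.pairwise_append.mpr ⟨?_, ?_, ?_⟩, ?_, ?_⟩
  · exact (List.pairwise_replicate).mpr (Or.inr le_rfl)
  · exact (List.pairwise_replicate).mpr (Or.inr le_rfl)
  · intro u hu v hv
    rw [List.eq_of_mem_replicate hu, List.eq_of_mem_replicate hv]
    omega
  · exact (List.pairwise_replicate).mpr (Or.inr le_rfl)
  · intro u hu v hv
    rw [List.eq_of_mem_replicate hv]
    rcases List.mem_append.mp hu with h | h <;>
      rw [List.eq_of_mem_replicate h] <;> omega

lemma pv_key_asc (m : Int) (a b c : Nat) : pvKey (pvAsc m a b c) = pvAsc m a b c := by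
  exact PySem.List.sorted_eq_self_of_pairwise _ _ (pv_asc_pairwise_le m a b c)


lemma pv_key_desc (m : Int) (a b c : Nat) : pvKey (pvDesc m a b c) = pvAsc m a b c := by
  have h := PySem.List.sorted_eq_sorted_of_perm (pvDesc m a b c) (pvAsc m a b c)
    (fun x => x) (fun _ _ h => h) (pv_asc_perm_desc m a b c).symm
  calc pvKey (pvDesc m a b c) = pvKey (pvAsc m a b c) := h
    _ = pvAsc m a b c := pv_key_asc m a b c


lemma pv_asc_length (m : Int) (a b c : Nat) : (pvAsc m a b c).length = a + b + c := by
  simp [pvAsc]; omega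


lemma pv_asc_sum (m : Int) (a b c : Nat) :
    (pvAsc m a b c).sum = (a : Int) * m + (b : Int) * (m+1) + (c : Int) * (m+2) := by
  simp [pvAsc, List.sum_replicate]
  push_cast
  ring


lemma pv_asc_mem (m : Int) (a b c : Nat) (x : Int) :
    x ∈ pvAsc m a b c ↔ (x = m ∧ 0 < a) ∨ (x = m+1 ∧ 0 < b) ∨ (x = m+2 ∧ 0 < c) := by
  simp only [pvAsc, List.mem_append, List.mem_replicate]
  omega



lemma pv_window1 (s : List Int) (v : Int) (h : ∀ x ∈ s, x = v) :
    s = List.replicate (s.count v) v := by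
  have hlen : s.count v = s.length := List.count_eq_length.mpr (fun b hb => (h b hb).symm)
  rw [hlen]
  exact List.eq_replicate_of_mem h

lemma pv_window2 : ∀ (s : List Int) (m : Int), s.Pairwise (· ≤ ·) →
    (∀ x ∈ s, x = m ∨ x = m+1) →
    s = List.replicate (s.count m) m ++ List.replicate (s.count (m+1)) (m+1) := by
  intro s
  induction s with
  | nil => intro m _ _; simp
  | cons x t ih =>
      intro m hp hmem
      rcases List.pairwise_cons.mp hp with ⟨hb, ht⟩
      rcases hmem x (by simp) with hx | hx
      · subst hx
        have hc1 : (x :: t).count x = t.count x + 1 := by simp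
        have hc2 : (x :: t).count (x+1) = t.count (x+1) := by
          rw [List.count_cons]; simp
        rw [hc1, hc2, List.replicate_succ, List.cons_append]
        congr 1
        exact ih x ht (fun z hz => hmem z (by simp [hz]))
      · subst hx
        have hall : ∀ z ∈ (m+1) :: t, z = m+1 := by
          intro z hz
          rcases List.mem_cons.mp hz with rfl | hz'
          · rfl
          · have h1 := hb z hz'
            rcases hmem z (by simp [hz']) with h2 | h2 <;> omega
        have hc0 : ((m+1) :: t).count m = 0 := by
          rw [List.count_eq_zero]
          intro hmm
          have := hall m hmm
          omega
        rw [hc0]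
        simpa using pv_window1 _ (m+1) hall

-- a ≤-sorted list with values in {m, m+1, m+2} is its counts' pvAsc
lemma pv_sorted_window : ∀ (s : List Int) (m : Int), s.Pairwise (· ≤ ·) →
    (∀ x ∈ s, x = m ∨ x = m+1 ∨ x = m+2) →
    s = pvAsc m (s.count m) (s.count (m+1)) (s.count (m+2)) := by
  intro s
  induction s with
  | nil => intro m _ _; simp [pvAsc]
  | cons x t ih =>
      intro m hp hmem
      rcases List.pairwise_cons.mp hp with ⟨hb, ht⟩
      by_cases hx : x = m
      · subst hx
        have hc1 : (x :: t).count x = t.count x + 1 := by simp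
        have hc2 : (x :: t).count (x+1) = t.count (x+1) := by
          rw [List.count_cons]; simp
        have hc3 : (x :: t).count (x+2) = t.count (x+2) := by
          rw [List.count_cons]; simp
        rw [hc1, hc2, hc3]
        have hstep : pvAsc x (t.count x + 1) (t.count (x+1)) (t.count (x+2))
            = x :: pvAsc x (t.count x) (t.count (x+1)) (t.count (x+2)) := by
          simp [pvAsc, List.replicate_succ]
        rw [hstep]
        congr 1
        exact ih x ht (fun z hz => hmem z (by simp [hz]))
      · have hmem2 : ∀ z ∈ x :: t, z = m+1 ∨ z = m+2 := by
          intro z hz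
          rcases List.mem_cons.mp hz with rfl | hz'
          · rcases hmem z (by simp) with h | h | h <;> first | exact absurd h hx | omega
          · have h1 := hb z hz'
            have h2 : m + 1 ≤ x := by
              rcases hmem x (by simp) with h | h | h <;> omega
            rcases hmem z (by simp [hz']) with h | h | h <;> omega
        have hc0 : (x :: t).count m = 0 := by
          rw [List.count_eq_zero]
          intro hmm
          rcases hmem2 m hmm with h | h <;> omega
        have hw2 := pv_window2 (x :: t) (m+1) hp (by
          intro z hz
          rcases hmem2 z hz with h | h
          · exact Or.inl h
          · right; omega)
        rw [hc0]
        have : m + 1 + 1 = m + 2 := by ring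
        rw [this] at hw2
        simpa [pvAsc] using hw2


-- lex comparison of distinct pvAsc's
lemma pv_asc_lt_of_m_lt (m m' : Int) (a b c a' b' c' : Nat) (ha : 0 < a) (ha' : 0 < a')
    (h : m < m') : pvAsc m a b c < pvAsc m' a' b' c' := by
  obtain ⟨a1, rfl⟩ : ∃ a1, a = a1 + 1 := ⟨a - 1, by omega⟩
  obtain ⟨a1', rfl⟩ : ∃ a1', a' = a1' + 1 := ⟨a' - 1, by omega⟩
  have e1 : pvAsc m (a1+1) b c
      = m :: (List.replicate a1 m ++ List.replicate b (m+1) ++ List.replicate c (m+2)) := by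
    simp [pvAsc, List.replicate_succ]
  have e2 : pvAsc m' (a1'+1) b' c'
      = m' :: (List.replicate a1' m' ++ List.replicate b' (m'+1) ++ List.replicate c' (m'+2)) := by
    simp [pvAsc, List.replicate_succ]
  rw [e1, e2]
  exact List.cons_lt_cons_iff.mpr (Or.inl h)


lemma pv_asc_lt_of_a_gt (m : Int) (a b c a' b' c' : Nat) (ha' : 0 < a')
    (hlen : a + b + c = a' + b' + c') (h : a' < a) : pvAsc m a b c < pvAsc m a' b' c' := by
  have e1 : pvAsc m a b c = List.replicate a' m ++
      (List.replicate (a - a') m ++ (List.replicate b (m+1) ++ List.replicate c (m+2))) := by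
    simp only [pvAsc, List.append_assoc]
    rw [← List.append_assoc (List.replicate a' m) (List.replicate (a - a') m),
      ← List.replicate_add, show a' + (a - a') = a from by omega]
  have e2 : pvAsc m a' b' c' = List.replicate a' m ++
      (List.replicate b' (m+1) ++ List.replicate c' (m+2)) := by
    simp only [pvAsc, List.append_assoc]
  rw [e1, e2, pv_append_lt_append_iff]
  obtain ⟨k, hk⟩ : ∃ k, a - a' = k + 1 := ⟨a - a' - 1, by omega⟩
  rw [hk, List.replicate_succ, List.cons_append]
  rcases Nat.eq_zero_or_pos b' with hb' | hb'
  · have hc' : 0 < c' := by omega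
    obtain ⟨j, hj⟩ : ∃ j, c' = j + 1 := ⟨c' - 1, by omega⟩
    rw [hb', hj, List.replicate_succ]
    simp only [List.replicate_zero, List.nil_append]
    exact List.cons_lt_cons_iff.mpr (Or.inl (by omega))
  · obtain ⟨i, hi⟩ : ∃ i, b' = i + 1 := ⟨b' - 1, by omega⟩
    rw [hi, List.replicate_succ, List.cons_append]
    exact List.cons_lt_cons_iff.mpr (Or.inl (by omega))


-- ---------- pvComps characterization ----------

lemma pv_mem_pvComps : ∀ (k : Nat), 1 ≤ k → ∀ (left : Int) (r : List Int),
    r ∈ pvComps left k ↔ (r.length = k ∧ (∀ x ∈ r, 1 ≤ x) ∧ r.sum = left)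
  | 0 => by omega
  | 1 => by
      intro _ left r
      simp only [pvComps]
      split
      · rename_i hleft
        simp only [List.mem_singleton]
        constructor
        · rintro rfl
          refine ⟨rfl, ?_, by simp⟩
          intro x hx
          simp at hx
          omega
        · rintro ⟨hlen, hpos, hsum⟩
          obtain ⟨y, rfl⟩ := List.length_eq_one_iff.mp hlen
          simp at hsum
          rw [hsum]
      · rename_i hleft
        simp only [List.not_mem_nil, false_iff]
        rintro ⟨hlen, hpos, hsum⟩
        have := pv_length_le_sum r hpos
        rw [hlen] at this
        simp at this
        omega
  | (k+2) => by
      intro _ left r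
      simp only [pvComps, List.mem_flatMap, List.mem_map, PySem.List.mem_pyRange_one]
      constructor
      · rintro ⟨v, ⟨hv1, hv2⟩, t, ht, rfl⟩
        have ih := (pv_mem_pvComps (k+1) (by omega) (left - v) t).mp ht
        refine ⟨by simp [ih.1], ?_, ?_⟩
        · intro x hx
          rcases List.mem_cons.mp hx with rfl | hx'
          · exact hv1
          · exact ih.2.1 x hx'
        · rw [List.sum_cons, ih.2.2]
          ring
      · rintro ⟨hlen, hpos, hsum⟩
        cases r with
        | nil => simp at hlen
        | cons v t =>
            have htlen : t.length = k + 1 := by simpa using hlen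
            have htpos : ∀ x ∈ t, 1 ≤ x := fun x hx => hpos x (by simp [hx])
            have htsum : t.sum = left - v := by
              rw [List.sum_cons] at hsum; omega
            have hlb := pv_length_le_sum t htpos
            rw [htlen, htsum] at hlb
            refine ⟨v, ⟨hpos v (by simp), by push_cast at hlb ⊢; omega⟩, t,
              (pv_mem_pvComps (k+1) (by omega) (left - v) t).mpr ⟨htlen, htpos, htsum⟩, rfl⟩


lemma pv_pairwise_pvComps : ∀ (k : Nat) (left : Int), (pvComps left k).Pairwise (· < ·)
  | 0 => by intro left; simp [pvComps]
  | 1 => by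
      intro left
      unfold pvComps
      split <;> simp
  | (k+2) => by
      intro left
      show (List.flatMap _ _).Pairwise _
      apply pv_pairwise_flatMap _ _ (· < ·) (· < ·) (PySem.List.pairwise_lt_pyRange_one _ _)
      · intro v _
        rw [List.pairwise_map]
        exact (pv_pairwise_pvComps (k+1) (left - v)).imp
          (fun h => List.cons_lt_cons_iff.mpr (Or.inr ⟨rfl, h⟩))
      · intro v _ w _ hvw x hx y hy
        obtain ⟨x', _, rfl⟩ := List.mem_map.mp hx
        obtain ⟨y', _, rfl⟩ := List.mem_map.mp hy
        exact List.cons_lt_cons_iff.mpr (Or.inl hvw)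


lemma pv_bt_eq : ∀ (k : Nat) (sofar : List Int) (left : Int) (acc : List (List Int)),
    pvBacktrack k sofar left acc
      = acc ++ ((pvComps left k).map (sofar ++ ·)).filter pvOk
  | 0 => by intro sofar left acc; simp [pvBacktrack, pvComps]
  | 1 => by
      intro sofar left acc
      simp only [pvBacktrack, pvComps]
      split
      · by_cases hOk : pvOk (sofar ++ [left]) <;> simp [hOk]
      · simp
  | (k+2) => by
      intro sofar left acc
      show (PySem.List.pyRange 1 (left - ((k : Int) + 2) + 2) 1).foldl
        (fun results v => pvBacktrack (k+1) (sofar ++ [v]) (left - v) results) acc = _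
      rw [pv_foldl_emit _
        (fun v => ((pvComps (left - v) (k+1)).map ((sofar ++ [v]) ++ ·)).filter pvOk)
        (fun acc v => pv_bt_eq (k+1) (sofar ++ [v]) (left - v) acc)]
      congr 1
      show _ = ((List.flatMap _ _).map _).filter _
      rw [List.map_flatMap, List.filter_flatMap]
      apply List.flatMap_congr
      intro v _
      rw [List.map_map]
      congr 1
      apply List.map_congr_left
      intro t _
      show sofar ++ [v] ++ t = sofar ++ (v :: t)
      rw [← List.append_cons]


-- ---------- floordiv bounds ----------

lemma pv_le_floordiv (t R q : Int) (hR : 0 < R) : q ≤ PySem.Int.floordiv t R ↔ q * R ≤ t := by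
  unfold PySem.Int.floordiv
  rw [Int.fdiv_eq_ediv]
  have h0 : (0:Int) ≤ R := le_of_lt hR
  simp only [h0, true_or, if_pos]
  rw [sub_zero]
  exact Int.le_ediv_iff_mul_le hR


-- ---------- per-R facts relating pvF and pvW ----------

lemma pv_F_mem (n R : Int) (hR : 1 ≤ R) (r : List Int) :
    r ∈ pvF n R.toNat ↔ ((r.length : Int) = R ∧ (∀ x ∈ r, 1 ≤ x) ∧ r.sum = n ∧ pvOk r) := by
  unfold pvF
  rw [List.mem_filter, pv_mem_pvComps R.toNat (by omega)]
  constructor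
  · rintro ⟨⟨h1, h2, h3⟩, h4⟩
    exact ⟨by omega, h2, h3, h4⟩
  · rintro ⟨h1, h2, h3, h4⟩
    exact ⟨⟨by omega, h2, h3⟩, h4⟩


lemma pv_mem_emit (n R m a : Int) (w : List Int) :
    w ∈ pvEmit n R m a ↔
      (0 ≤ 2*(R-a) - (n - m*R)) ∧ (0 ≤ (n - m*R) - (R-a)) ∧
      (4 ≤ (if 0 < (n - m*R) - (R-a) then m+2 else if 0 < 2*(R-a) - (n - m*R) then m+1 else m)) ∧
      w = pvDesc m a.toNat (2*(R-a) - (n - m*R)).toNat ((n - m*R) - (R-a)).toNat := by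
  unfold pvEmit
  by_cases h1 : 2*(R - a) - (n - m * R) < 0 ∨ (n - m * R) - (R - a) < 0
  · rw [if_pos h1]
    simp only [List.not_mem_nil, false_iff]
    rintro ⟨c1, c2, _, _⟩
    omega
  · rw [if_neg h1]
    by_cases h2 : (if 0 < (n - m * R) - (R - a) then m+2
        else if 0 < 2*(R - a) - (n - m * R) then m+1 else m) < 4
    · rw [if_pos h2]
      simp only [List.not_mem_nil, false_iff]
      rintro ⟨_, _, c3, _⟩
      exact absurd c3 (not_le.mpr h2)
    · rw [if_neg h2]
      simp only [List.mem_singleton]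
      constructor
      · intro hw
        exact ⟨by omega, by omega, not_lt.mp h2, hw⟩
      · exact fun hw => hw.2.2.2

lemma pv_max_perm (s r : List Int) (h : s.Perm r) : pvMax s = pvMax r := by
  by_cases hs : s = []
  · subst hs
    have : r = [] := h.symm.eq_nil
    subst this; rfl
  · obtain ⟨M, hM⟩ : ∃ M, PySem.List.max? s (fun x => x) = some M := by
      cases hm : PySem.List.max? s (fun x => x) with
      | none => exact absurd ((PySem.List.max?_eq_none_iff s _).mp hm) hs
      | some M => exact ⟨M, rfl⟩
    have h1 : pvMax s = M := by simp [pvMax, hM]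
    have h2 : pvMax r = M := pv_max_eq r M (h.subset (PySem.List.max?_mem hM))
      (fun y hy => PySem.List.max?_isMax hM y (h.symm.subset hy))
    rw [h1, h2]

lemma pv_min_perm (s r : List Int) (h : s.Perm r) : pvMin s = pvMin r := by
  by_cases hs : s = []
  · subst hs
    have : r = [] := h.symm.eq_nil
    subst this; rfl
  · obtain ⟨M, hM⟩ : ∃ M, PySem.List.min? s (fun x => x) = some M := by
      cases hm : PySem.List.min? s (fun x => x) with
      | none => exact absurd ((PySem.List.min?_eq_none_iff s _).mp hm) hs
      | some M => exact ⟨M, rfl⟩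
    have h1 : pvMin s = M := by simp [pvMin, hM]
    have h2 : pvMin r = M := pv_min_eq r M (h.subset (PySem.List.min?_mem hM))
      (fun y hy => PySem.List.min?_isMin hM y (h.symm.subset hy))
    rw [h1, h2]

lemma pv_min_asc (m : Int) (a b c : Nat) (ha : 0 < a) :
    pvMin (pvAsc m a b c) = m := by
  apply pv_min_eq
  · rw [pv_asc_mem]; exact Or.inl ⟨rfl, ha⟩
  · intro y hy
    rcases (pv_asc_mem m a b c y).mp hy with ⟨h, _⟩ | ⟨h, _⟩ | ⟨h, _⟩ <;> omega

lemma pv_max_asc (m : Int) (a b c : Nat) (ha : 0 < a) :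
    pvMax (pvAsc m a b c) = (if 0 < c then m+2 else if 0 < b then m+1 else m) := by
  apply pv_max_eq
  · rw [pv_asc_mem]
    rcases Nat.eq_zero_or_pos c with hc | hc
    · rcases Nat.eq_zero_or_pos b with hb | hb
      · simp [hb, hc]
        exact ha
      · simp [hb, hc]
    · simp [hc]
  · intro y hy
    rcases (pv_asc_mem m a b c y).mp hy with ⟨h, _⟩ | ⟨h, hb⟩ | ⟨h, hc⟩ <;>
      split_ifs <;> omega

-- every element of B's block is a pvDesc with its parameters in range and conditions true
lemma pv_W_mem (n R : Int) (w : List Int) :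
    w ∈ pvW n R ↔ ∃ m a : Int,
      (pvLo n R ≤ m ∧ m ≤ pvHi n R) ∧ (0 < a ∧ a ≤ R) ∧
      (0 ≤ 2*(R-a) - (n - m*R)) ∧ (0 ≤ (n - m*R) - (R-a)) ∧
      (4 ≤ (if 0 < (n - m*R) - (R-a) then m+2 else if 0 < 2*(R-a) - (n - m*R) then m+1 else m)) ∧
      w = pvDesc m a.toNat (2*(R-a) - (n - m*R)).toNat ((n - m*R) - (R-a)).toNat := by
  unfold pvW
  simp only [List.mem_flatMap, PySem.List.mem_pyRange_one, PySem.List.mem_pyRange_neg_one,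
    pv_mem_emit]
  constructor
  · rintro ⟨m, ⟨h1, h2⟩, a, ⟨h3, h4⟩, h5, h6, h7, h8⟩
    exact ⟨m, a, ⟨h1, by omega⟩, ⟨h3, h4⟩, h5, h6, h7, h8⟩
  · rintro ⟨m, a, ⟨h1, h2⟩, ⟨h3, h4⟩, h5, h6, h7, h8⟩
    exact ⟨m, ⟨h1, by omega⟩, a, ⟨h3, h4⟩, h5, h6, h7, h8⟩


-- h2: keys of A's filtered compositions occur among B's keys
lemma pv_h2 (n R : Int) (hR : 1 ≤ R) (r : List Int) (hr : r ∈ pvF n R.toNat) :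
    pvKey r ∈ (pvW n R).map pvKey := by
  obtain ⟨hlen, hpos, hsum, hok⟩ := (pv_F_mem n R hR r).mp hr
  have hok' : pvMax r - pvMin r ≤ 2 ∧ 4 ≤ pvMax r := by simpa [pvOk] using hok
  have hne : r ≠ [] := by
    intro h; subst h; simp at hlen; omega
  obtain ⟨mv, hmv⟩ : ∃ mv, PySem.List.min? r (fun x => x) = some mv := by
    cases hm : PySem.List.min? r (fun x => x) with
    | none => exact absurd ((PySem.List.min?_eq_none_iff r _).mp hm) hne
    | some mv => exact ⟨mv, rfl⟩
  obtain ⟨Mv, hMv⟩ : ∃ Mv, PySem.List.max? r (fun x => x) = some Mv := by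
    cases hm : PySem.List.max? r (fun x => x) with
    | none => exact absurd ((PySem.List.max?_eq_none_iff r _).mp hm) hne
    | some Mv => exact ⟨Mv, rfl⟩
  have hminr : pvMin r = mv := by simp [pvMin, hmv]
  have hmin_mem : pvMin r ∈ r := by rw [hminr]; exact PySem.List.min?_mem hmv
  have hmin_le : ∀ y ∈ r, pvMin r ≤ y := by
    intro y hy; rw [hminr]; exact PySem.List.min?_isMin hmv y hy
  have hmaxr : pvMax r = Mv := by simp [pvMax, hMv]
  have hmax_ge : ∀ y ∈ r, y ≤ pvMax r := by
    intro y hy; rw [hmaxr]; exact PySem.List.max?_isMax hMv y hy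
  have hperm : (pvKey r).Perm r := PySem.List.sorted_perm r _ false
  have hpair : (pvKey r).Pairwise (· ≤ ·) := PySem.List.sorted_pairwise r (fun x => x)
  have hwin : ∀ x ∈ pvKey r, x = pvMin r ∨ x = pvMin r + 1 ∨ x = pvMin r + 2 := by
    intro x hxs
    have hxr := hperm.subset hxs
    have h1 := hmin_le x hxr
    have h2 := hmax_ge x hxr
    have h3 := hok'.1
    omega
  have hdec := pv_sorted_window (pvKey r) (pvMin r) hpair hwin
  have hlen2 : (pvKey r).count (pvMin r) + (pvKey r).count (pvMin r + 1)
      + (pvKey r).count (pvMin r + 2) = R.toNat := by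
    have h := congrArg List.length hdec
    rw [pv_asc_length] at h
    have hsl : (pvKey r).length = r.length := hperm.length_eq
    omega
  have hsum2 : ((pvKey r).count (pvMin r) : Int) * pvMin r
      + ((pvKey r).count (pvMin r + 1) : Int) * (pvMin r + 1)
      + ((pvKey r).count (pvMin r + 2) : Int) * (pvMin r + 2) = n := by
    have h := congrArg List.sum hdec
    rw [pv_asc_sum] at h
    have hss : (pvKey r).sum = r.sum := hperm.sum_eq
    rw [hss, hsum] at h
    exact h.symm
  have ha_pos : 0 < (pvKey r).count (pvMin r) :=
    List.count_pos_iff.mpr (hperm.symm.subset hmin_mem)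
  set m := pvMin r
  set aN := (pvKey r).count m
  set bN := (pvKey r).count (m + 1)
  set cN := (pvKey r).count (m + 2)
  have hRcast : ((aN:Int) + bN + cN) = R := by omega
  have hkey : n - m * R = (bN:Int) + 2*(cN:Int) := by
    linear_combination m * hRcast - hsum2
  have hmax_eq : pvMax r = (if 0 < cN then m+2 else if 0 < bN then m+1 else m) := by
    rw [← pv_max_perm (pvKey r) r hperm, hdec, pv_max_asc _ _ _ _ ha_pos]
  have hb' : 2*(R-(aN:Int)) - (n - m*R) = (bN:Int) := by
    linear_combination (-1) * hkey + (-2) * hRcast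
  have hc' : (n - m*R) - (R-(aN:Int)) = (cN:Int) := by
    linear_combination hkey + hRcast
  have hm2 : 2 ≤ m := by
    have h1 : pvMax r ≤ m + 2 := by
      have := hok'.1; omega
    have := hok'.2
    omega
  apply List.mem_map.mpr
  refine ⟨pvDesc m aN bN cN, ?_, ?_⟩
  · apply (pv_W_mem n R _).mpr
    refine ⟨m, (aN:Int), ⟨?_, ?_⟩, ⟨by exact_mod_cast ha_pos, by omega⟩, ?_, ?_, ?_, ?_⟩
    · unfold pvLo
      apply max_le hm2
      rw [neg_le]
      apply (pv_le_floordiv _ R (-m) (by omega)).mpr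
      have hx : (-m) * R = -(m * R) := by ring
      rw [hx]
      have h1 : (1:Int) ≤ (aN:Int) := by exact_mod_cast ha_pos
      have h2 : (0:Int) ≤ (bN:Int) := by positivity
      have h3 : (0:Int) ≤ (cN:Int) := by positivity
      linarith [hkey, hRcast]
    · unfold pvHi
      apply (pv_le_floordiv n R m (by omega)).mpr
      have h2 : (0:Int) ≤ (bN:Int) := by positivity
      have h3 : (0:Int) ≤ (cN:Int) := by positivity
      linarith [hkey]
    · rw [hb']; positivity
    · rw [hc']; positivity
    · rw [hb', hc']
      have hif : (if 0 < (cN:Int) then m+2 else if 0 < (bN:Int) then m+1 else m)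
          = (if 0 < cN then m+2 else if 0 < bN then m+1 else m) := by
        split_ifs <;> omega
      rw [hif, ← hmax_eq]
      exact hok'.2
    · rw [hb', hc']
      simp
  · rw [pv_key_desc]
    exact hdec.symm


-- h4: B's keys (asc) and their reverses (desc) are in A's filtered compositions
lemma pv_h4 (n R : Int) (hR : 1 ≤ R) (kk : List Int) (hk : kk ∈ (pvW n R).map pvKey) :
    kk ∈ pvF n R.toNat ∧ kk.reverse ∈ pvF n R.toNat := by
  obtain ⟨w, hw, rfl⟩ := List.mem_map.mp hk
  obtain ⟨m, a, ⟨hlo, hhi⟩, ⟨ha0, haR⟩, hb0, hc0, hmx, rfl⟩ := (pv_W_mem n R w).mp hw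
  rw [pv_key_desc]
  have hm2 : 2 ≤ m := le_trans (le_max_left 2 _) hlo
  have hcast_a : ((a.toNat : Int)) = a := Int.toNat_of_nonneg (by omega)
  have hcast_b : (((2*(R-a) - (n - m*R)).toNat : Int)) = 2*(R-a) - (n - m*R) :=
    Int.toNat_of_nonneg hb0
  have hcast_c : ((((n - m*R) - (R-a)).toNat : Int)) = (n - m*R) - (R-a) :=
    Int.toNat_of_nonneg hc0
  have hsum_int : a + (2*(R-a) - (n - m*R)) + ((n - m*R) - (R-a)) = R := by ring
  have hlen : a.toNat + (2*(R-a) - (n - m*R)).toNat + ((n - m*R) - (R-a)).toNat = R.toNat := by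
    omega
  have hpos : ∀ x ∈ pvAsc m a.toNat (2*(R-a) - (n - m*R)).toNat ((n - m*R) - (R-a)).toNat,
      1 ≤ x := by
    intro x hx
    rcases (pv_asc_mem _ _ _ _ x).mp hx with ⟨h, _⟩ | ⟨h, _⟩ | ⟨h, _⟩ <;> omega
  have hsum : (pvAsc m a.toNat (2*(R-a) - (n - m*R)).toNat ((n - m*R) - (R-a)).toNat).sum = n := by
    rw [pv_asc_sum, hcast_a, hcast_b, hcast_c]
    ring
  have ha_pos : 0 < a.toNat := by omega
  have hmin := pv_min_asc m a.toNat (2*(R-a) - (n - m*R)).toNat ((n - m*R) - (R-a)).toNat ha_pos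
  have hmaxv := pv_max_asc m a.toNat (2*(R-a) - (n - m*R)).toNat ((n - m*R) - (R-a)).toNat ha_pos
  have hif : (if 0 < ((n - m*R) - (R-a)).toNat then m+2
      else if 0 < (2*(R-a) - (n - m*R)).toNat then m+1 else m)
      = (if 0 < (n - m*R) - (R-a) then m+2 else if 0 < 2*(R-a) - (n - m*R) then m+1 else m) := by
    split_ifs <;> omega
  have hok : pvOk (pvAsc m a.toNat (2*(R-a) - (n - m*R)).toNat ((n - m*R) - (R-a)).toNat) = true := by
    simp only [pvOk, decide_eq_true_eq]
    rw [hmaxv, hmin, hif]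
    constructor
    · split_ifs <;> omega
    · exact hmx
  have hlenc : ((pvAsc m a.toNat (2*(R-a) - (n - m*R)).toNat ((n - m*R) - (R-a)).toNat).length : Int)
      = R := by
    rw [pv_asc_length]
    omega
  constructor
  · exact (pv_F_mem n R hR _).mpr ⟨hlenc, hpos, hsum, hok⟩
  · rw [pv_reverse_asc]
    have hperm := pv_asc_perm_desc m a.toNat (2*(R-a) - (n - m*R)).toNat ((n - m*R) - (R-a)).toNat
    apply (pv_F_mem n R hR _).mpr
    refine ⟨by rw [← hperm.length_eq]; exact hlenc, ?_, by rw [← hperm.sum_eq]; exact hsum, ?_⟩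
    · intro x hx
      exact hpos x (hperm.symm.subset hx)
    · simp only [pvOk, decide_eq_true_eq] at hok ⊢
      rw [← pv_max_perm _ _ hperm, ← pv_min_perm _ _ hperm]
      exact hok


lemma pv_key_emit (n R m a : Int) (x : List Int) (hx : x ∈ (pvEmit n R m a).map pvKey) :
    x = pvAsc m a.toNat (2*(R-a) - (n - m*R)).toNat ((n - m*R) - (R-a)).toNat
      ∧ 0 ≤ 2*(R-a) - (n - m*R) ∧ 0 ≤ (n - m*R) - (R-a) := by
  obtain ⟨w, hw, rfl⟩ := List.mem_map.mp hx
  obtain ⟨h1, h2, _, rfl⟩ := (pv_mem_emit n R m a w).mp hw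
  exact ⟨pv_key_desc _ _ _ _, h1, h2⟩

-- h3: B's keys are strictly lex-increasing
lemma pv_h3 (n R : Int) : ((pvW n R).map pvKey).Pairwise (· < ·) := by
  unfold pvW
  rw [List.map_flatMap]
  apply pv_pairwise_flatMap _ _ (· < ·) (· < ·) (PySem.List.pairwise_lt_pyRange_one _ _)
  · intro m _
    rw [List.map_flatMap]
    apply pv_pairwise_flatMap _ _ (fun a a' => a' < a) (· < ·)
    · rw [PySem.List.pyRange_neg_one_eq_reverse, List.pairwise_reverse]
      exact PySem.List.pairwise_lt_pyRange_one _ _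
    · intro a _
      unfold pvEmit
      split_ifs <;> simp
    · intro a ha w hw hp x hx y hy
      obtain ⟨hxe, hxb, hxc⟩ := pv_key_emit n R m a x hx
      obtain ⟨hye, hyb, hyc⟩ := pv_key_emit n R m w y hy
      rw [PySem.List.mem_pyRange_neg_one] at ha hw
      subst hxe hye
      apply pv_asc_lt_of_a_gt
      · omega
      · have e1 : a + (2*(R-a) - (n - m*R)) + ((n - m*R) - (R-a)) = R := by ring
        have e2 : w + (2*(R-w) - (n - m*R)) + ((n - m*R) - (R-w)) = R := by ring
        omega
      · omega
  · intro m hm m' hm' hmm x hx y hy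
    rw [List.map_flatMap] at hx hy
    rcases List.mem_flatMap.mp hx with ⟨a, ha, hxa⟩
    rcases List.mem_flatMap.mp hy with ⟨a', ha', hya⟩
    obtain ⟨hxe, hxb, hxc⟩ := pv_key_emit n R m a x hxa
    obtain ⟨hye, hyb, hyc⟩ := pv_key_emit n R m' a' y hya
    rw [PySem.List.mem_pyRange_neg_one] at ha ha'
    subst hxe hye
    apply pv_asc_lt_of_m_lt
    · omega
    · omega
    · exact hmm


-- h6/h7 packaged
lemma pv_h67 (n R : Int) (kk : List Int) (hk : kk ∈ (pvW n R).map pvKey) :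
    pvKey kk = kk ∧ pvKey kk.reverse = kk := by
  obtain ⟨w, hw, rfl⟩ := List.mem_map.mp hk
  obtain ⟨m, a, _, _, _, _, _, rfl⟩ := (pv_W_mem n R w).mp hw
  rw [pv_key_desc]
  exact ⟨pv_key_asc _ _ _ _, by rw [pv_reverse_asc, pv_key_desc]⟩


-- reverse of B's keys gives back B's block
lemma pv_ks_reverse (n R : Int) : ((pvW n R).map pvKey).map List.reverse = pvW n R := by
  rw [List.map_map]
  have h : ∀ w ∈ pvW n R, (List.reverse ∘ pvKey) w = w := by
    intro w hw
    obtain ⟨m, a, _, _, _, _, _, rfl⟩ := (pv_W_mem n R w).mp hw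
    show (pvKey _).reverse = _
    rw [pv_key_desc, pv_reverse_asc]
  rw [List.map_congr_left h]
  exact List.map_id' _


-- ---------- the glue: dict(first-occurrence keys → last value) over a lex-sorted list ----------

lemma pv_glue : ∀ (ks L : List (List Int)),
    L.Pairwise (· < ·) →
    (∀ r ∈ L, pvKey r ∈ ks) →
    ks.Pairwise (· < ·) →
    (∀ kk ∈ ks, kk ∈ L ∧ kk.reverse ∈ L) →
    (∀ kk ∈ ks, pvKey kk = kk ∧ pvKey kk.reverse = kk) →
    (PySem.List.dedup (L.map pvKey)).map (fun kk => L.foldl (pvPick kk) [])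
      = ks.map List.reverse := by
  intro ks
  induction ks with
  | nil =>
      intro L _ h2 _ _ _
      have hL : L = [] := by
        cases L with
        | nil => rfl
        | cons r t => exact absurd (h2 r (by simp)) (by simp)
      subst hL
      simp [PySem.List.dedup_eq_ofList, PySem.Set.ofList]
  | cons k1 kt ih =>
      intro L h1 h2 h3 h4 h67
      have hk1L : k1 ∈ L := (h4 k1 (by simp)).1
      have hbound : ∀ r ∈ L, k1 ≤ r := by
        intro r hr
        have hkr := h2 r hr
        have hkey_le : pvKey r ≤ r :=
          pv_sorted_le_perm _ _ (PySem.List.sorted_perm r _ false)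
            (PySem.List.sorted_pairwise r (fun x => x))
        rcases List.mem_cons.mp hkr with he | hm
        · rw [← he]; exact hkey_le
        · exact le_trans (le_of_lt ((List.pairwise_cons.mp h3).1 _ hm)) hkey_le
      obtain ⟨r0, Lt, rfl⟩ : ∃ r0 Lt, L = r0 :: Lt := by
        cases L with
        | nil => exact absurd hk1L (by simp)
        | cons r0 Lt => exact ⟨r0, Lt, rfl⟩
      have hr0 : r0 = k1 := by
        rcases List.mem_cons.mp hk1L with he | hm
        · exact he.symm
        · have hlt : r0 < k1 := (List.pairwise_cons.mp h1).1 k1 hm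
          have hle : k1 ≤ r0 := hbound r0 (by simp)
          exact absurd hlt (not_lt.mpr hle)
      subst hr0
      have hkey_k1 : pvKey r0 = r0 := (h67 r0 (by simp)).1
      have hmap : (r0 :: Lt).map pvKey = r0 :: Lt.map pvKey := by
        rw [List.map_cons, hkey_k1]
      rw [hmap, pv_dedup_cons]
      have hfm : (Lt.map pvKey).filter (fun y => decide (y ≠ r0))
          = (Lt.filter (fun r => decide (pvKey r ≠ r0))).map pvKey := List.filter_map
      rw [hfm, List.map_cons]
      have hrev : pvKey r0.reverse = r0 := (h67 r0 (by simp)).2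
      have hrevmem : r0.reverse ∈ r0 :: Lt := (h4 r0 (by simp)).2
      have hkbound : ∀ r ∈ r0 :: Lt, pvKey r = r0 → r ≤ r0.reverse := by
        intro r hr hk
        have h5 : r ≤ (pvKey r).reverse :=
          pv_perm_le_desc (pvKey r).reverse r
            ((List.reverse_perm (pvKey r)).trans (PySem.List.sorted_perm r _ false))
            (List.pairwise_reverse.mpr (PySem.List.sorted_pairwise r (fun x => x)))
        rwa [hk] at h5
      have hhead : (r0 :: Lt).foldl (pvPick r0) [] = r0.reverse :=
        pv_pick_last r0 _ h1 r0.reverse hrevmem hrev hkbound []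
      rw [hhead]
      have hk1kt : r0 ∉ kt := by
        intro hmem
        exact absurd ((List.pairwise_cons.mp h3).1 r0 hmem) (lt_irrefl r0)
      have htail : ∀ kk ∈ PySem.List.dedup ((Lt.filter (fun r => decide (pvKey r ≠ r0))).map pvKey),
          (r0 :: Lt).foldl (pvPick kk) [] = (Lt.filter (fun r => decide (pvKey r ≠ r0))).foldl (pvPick kk) [] := by
        intro kk hkk
        have hkk' : kk ∈ (Lt.filter (fun r => decide (pvKey r ≠ r0))).map pvKey := by
          have := PySem.List.mem_dedup (x := kk)
            (xs := (Lt.filter (fun r => decide (pvKey r ≠ r0))).map pvKey)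
          exact this.mp hkk
        obtain ⟨r, hrL', rfl⟩ := List.mem_map.mp hkk'
        have hrprop := List.mem_filter.mp hrL'
        have hne : pvKey r ≠ r0 := by simpa using hrprop.2
        rw [List.foldl_cons]
        have hstep : pvPick (pvKey r) [] r0 = [] := by
          unfold pvPick
          rw [hkey_k1, if_neg (fun h => hne h.symm)]
        rw [hstep]
        exact (pv_pick_filter (pvKey r) r0 hne Lt []).symm
      rw [List.map_congr_left htail]
      have happly := ih (Lt.filter (fun r => decide (pvKey r ≠ r0)))
        (List.Pairwise.sublist (List.filter_sublist) (List.pairwise_cons.mp h1).2)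
        (by
          intro r hr
          have hrprop := List.mem_filter.mp hr
          have hne : pvKey r ≠ r0 := by simpa using hrprop.2
          have := h2 r (by simp [hrprop.1])
          rcases List.mem_cons.mp this with he | hm
          · exact absurd he hne
          · exact hm)
        (List.pairwise_cons.mp h3).2
        (by
          intro kk hkk
          have hkkne : kk ≠ r0 := by
            intro he; subst he; exact hk1kt hkk
          have h4' := h4 kk (by simp [hkk])
          have h67' := h67 kk (by simp [hkk])
          constructor
          · have : kk ∈ Lt := by
              rcases List.mem_cons.mp h4'.1 with he | hm
              · exact absurd he hkkne
              · exact hm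
            exact List.mem_filter.mpr ⟨this, by simpa [h67'.1] using hkkne⟩
          · have hkrevne : kk.reverse ≠ r0 := by
              intro he
              have := h67'.2
              rw [he, hkey_k1] at this
              exact hkkne this.symm
            have : kk.reverse ∈ Lt := by
              rcases List.mem_cons.mp h4'.2 with he | hm
              · exact absurd he hkrevne
              · exact hm
            exact List.mem_filter.mpr ⟨this, by simpa [h67'.2] using hkkne⟩)
        (fun kk hkk => h67 kk (by simp [hkk]))
      rw [happly, List.map_cons]


-- per-R conclusion
lemma pv_perR (n R : Int) (hR : 1 ≤ R) :
    (PySem.List.dedup ((pvF n R.toNat).map pvKey)).map (fun kk => (pvF n R.toNat).foldl (pvPick kk) [])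
      = pvW n R := by
  have h := pv_glue ((pvW n R).map pvKey) (pvF n R.toNat)
    (List.Pairwise.sublist (List.filter_sublist) (pv_pairwise_pvComps R.toNat n))
    (pv_h2 n R hR)
    (pv_h3 n R)
    (pv_h4 n R hR)
    (pv_h67 n R)
  rw [pv_ks_reverse] at h
  exact h


-- ---------- whole-program reductions ----------

lemma pv_A_eq (n : Int) :
    generate_hex_row_combinations_py n
      = PySem.List.sorted2
          ((PySem.List.dedup (((pvF n 4 ++ pvF n 5) ++ pvF n 6).map pvKey)).map
            (fun kk => ((pvF n 4 ++ pvF n 5) ++ pvF n 6).foldl (pvPick kk) []))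
          (fun r => pvMax r - pvMin r) (fun r => -(pvMax r)) false := by
  unfold generate_hex_row_combinations_py
  have hrange : PySem.List.pyRange 4 7 1 = [4, 5, 6] := by decide
  rw [hrange]
  simp only [List.foldl_cons, List.foldl_nil]
  have ht4 : (4:Int).toNat = 4 := rfl
  have ht5 : (5:Int).toNat = 5 := rfl
  have ht6 : (6:Int).toNat = 6 := rfl
  rw [ht4, ht5, ht6, pv_bt_eq 4, pv_bt_eq 5, pv_bt_eq 6]
  simp only [List.nil_append]
  have hid : ∀ (k : Nat), ((pvComps n k).map (fun x => x)).filter pvOk = pvF n k := by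
    intro k
    unfold pvF
    congr 1
    exact List.map_id' _
  rw [hid 4, hid 5, hid 6]
  set results := (pvF n 4 ++ pvF n 5) ++ pvF n 6 with hres
  have hnodup : ((results.foldl (fun d r => d.insert (pvKey r) r)
      PySem.Dict.empty).keys).Nodup := by
    apply PySem.Dict.nodup_keys_foldl_insert_key results pvKey (fun _ r => r)
    simp [PySem.Dict.keys_empty]
  rw [PySem.Dict.values_eq_map_keys _ hnodup []]
  have hkeys : ((results.foldl (fun d r => d.insert (pvKey r) r) PySem.Dict.empty).keys)
      = PySem.List.dedup (results.map pvKey) := by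
    rw [PySem.Dict.keys_foldl_insert_key results pvKey (fun _ r => r)]
    rw [PySem.List.dedup_eq_ofList]
    rfl
  rw [hkeys]
  congr 1
  apply List.map_congr_left
  intro kk _
  rw [pv_getD_insert_fold results PySem.Dict.empty kk []]
  rw [PySem.Dict.getD_empty]


lemma pv_B_eq (n : Int) :
    generate_hex_row_combinations_py_alt n
      = PySem.List.sorted2 ((pvW n 4 ++ pvW n 5) ++ pvW n 6)
          (fun r => pvMax r - pvMin r) (fun r => -(pvMax r)) false := by
  unfold generate_hex_row_combinations_py_alt
  have hrange : PySem.List.pyRange 4 7 1 = [4, 5, 6] := by decide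
  rw [hrange]
  have hblock : ∀ (R : Int) (combos : List (List Int)),
      (PySem.List.pyRange (max 2 (-(PySem.Int.floordiv (2*(R-1) - n) R)))
          (PySem.Int.floordiv n R + 1) 1).foldl
        (fun combos m =>
          (PySem.List.pyRange R 0 (-1)).foldl
            (fun combos a =>
              if 2*(R - a) - (n - m * R) < 0 ∨ (n - m * R) - (R - a) < 0 then combos
              else
                if (if 0 < (n - m * R) - (R - a) then m+2
                    else if 0 < 2*(R - a) - (n - m * R) then m+1 else m) < 4 then combos
                else combos ++ [List.replicate ((n - m * R) - (R - a)).toNat (m+2)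
                  ++ List.replicate (2*(R - a) - (n - m * R)).toNat (m+1)
                  ++ List.replicate a.toNat m]) combos) combos
      = combos ++ pvW n R := by
    intro R combos
    have hinner : ∀ (m : Int) (acc : List (List Int)),
        (PySem.List.pyRange R 0 (-1)).foldl
          (fun combos a =>
            if 2*(R - a) - (n - m * R) < 0 ∨ (n - m * R) - (R - a) < 0 then combos
            else
              if (if 0 < (n - m * R) - (R - a) then m+2
                  else if 0 < 2*(R - a) - (n - m * R) then m+1 else m) < 4 then combos
              else combos ++ [List.replicate ((n - m * R) - (R - a)).toNat (m+2)
                ++ List.replicate (2*(R - a) - (n - m * R)).toNat (m+1)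
                ++ List.replicate a.toNat m]) acc
        = acc ++ (PySem.List.pyRange R 0 (-1)).flatMap (fun a => pvEmit n R m a) := by
      intro m acc
      apply pv_foldl_emit _ (fun a => pvEmit n R m a)
      intro acc' a
      unfold pvEmit pvDesc
      split_ifs <;> simp
    rw [pv_foldl_emit _ (fun m => (PySem.List.pyRange R 0 (-1)).flatMap (fun a => pvEmit n R m a))
      (fun acc m => hinner m acc)]
    rfl
  simp only [List.foldl_cons, List.foldl_nil]
  rw [hblock 4, hblock 5, hblock 6]
  simp only [List.nil_append]


lemma pv_main (n : Int) :
    generate_hex_row_combinations_py n = generate_hex_row_combinations_py_alt n := by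
  rw [pv_A_eq, pv_B_eq]
  congr 1
  have hlenF : ∀ (k : Nat), 1 ≤ k → ∀ r ∈ pvF n k, (pvKey r).length = k := by
    intro k hk r hr
    have h1 := (List.mem_filter.mp hr).1
    have h2 := (pv_mem_pvComps k hk n r).mp h1
    unfold pvKey
    rw [(PySem.List.sorted_perm r (fun x => x) false).length_eq]
    exact h2.1
  have hkeylen : ∀ (k : Nat), 1 ≤ k → ∀ y ∈ (pvF n k).map pvKey, y.length = k := by
    rintro k hk y hy
    obtain ⟨r, hr, rfl⟩ := List.mem_map.mp hy
    exact hlenF k hk r hr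
  rw [List.map_append, List.map_append]
  have hdis1 : ∀ y ∈ (pvF n 6).map pvKey, y ∉ (pvF n 4).map pvKey ++ (pvF n 5).map pvKey := by
    intro y hy hmem
    have h6 := hkeylen 6 (by omega) y hy
    rcases List.mem_append.mp hmem with h | h
    · have := hkeylen 4 (by omega) y h; omega
    · have := hkeylen 5 (by omega) y h; omega
  have hdis2 : ∀ y ∈ (pvF n 5).map pvKey, y ∉ (pvF n 4).map pvKey := by
    intro y hy hmem
    have h5 := hkeylen 5 (by omega) y hy
    have := hkeylen 4 (by omega) y hmem; omega
  rw [pv_dedup_append _ _ hdis1, pv_dedup_append _ _ hdis2]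
  rw [List.map_append, List.map_append]
  have hnm : ∀ (k j : Nat) (kk : List Int) (init : List Int), kk.length ≠ j → 1 ≤ j →
      (pvF n j).foldl (pvPick kk) init = init := by
    intro k j kk init hne hj
    apply pv_pick_no_match
    intro r hr hkr
    have := hlenF j hj r hr
    rw [hkr] at this
    omega
  have hfold4 : ∀ kk ∈ PySem.List.dedup ((pvF n 4).map pvKey),
      ((pvF n 4 ++ pvF n 5) ++ pvF n 6).foldl (pvPick kk) [] = (pvF n 4).foldl (pvPick kk) [] := by
    intro kk hkk
    have hl : kk.length = 4 := by
      have := (PySem.List.mem_dedup _ _).mp hkk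
      exact hkeylen 4 (by omega) kk this
    rw [List.foldl_append, List.foldl_append]
    rw [hnm 4 5 kk _ (by omega) (by omega), hnm 4 6 kk _ (by omega) (by omega)]
  have hfold5 : ∀ kk ∈ PySem.List.dedup ((pvF n 5).map pvKey),
      ((pvF n 4 ++ pvF n 5) ++ pvF n 6).foldl (pvPick kk) [] = (pvF n 5).foldl (pvPick kk) [] := by
    intro kk hkk
    have hl : kk.length = 5 := by
      have := (PySem.List.mem_dedup _ _).mp hkk
      exact hkeylen 5 (by omega) kk this
    rw [List.foldl_append, List.foldl_append]
    rw [hnm 5 4 kk _ (by omega) (by omega), hnm 5 6 kk _ (by omega) (by omega)]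
  have hfold6 : ∀ kk ∈ PySem.List.dedup ((pvF n 6).map pvKey),
      ((pvF n 4 ++ pvF n 5) ++ pvF n 6).foldl (pvPick kk) [] = (pvF n 6).foldl (pvPick kk) [] := by
    intro kk hkk
    have hl : kk.length = 6 := by
      have := (PySem.List.mem_dedup _ _).mp hkk
      exact hkeylen 6 (by omega) kk this
    rw [List.foldl_append, List.foldl_append]
    rw [hnm 6 4 kk _ (by omega) (by omega), hnm 6 5 kk _ (by omega) (by omega)]
  rw [List.map_congr_left hfold4, List.map_congr_left hfold5, List.map_congr_left hfold6]
  have h4 := pv_perR n 4 (by omega)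
  have h5 := pv_perR n 5 (by omega)
  have h6 := pv_perR n 6 (by omega)
  rw [show ((4:Int).toNat) = 4 from rfl] at h4
  rw [show ((5:Int).toNat) = 5 from rfl] at h5
  rw [show ((6:Int).toNat) = 6 from rfl] at h6
  rw [h4, h5, h6]


-- ===== VERDICT (by name: the statement is the Claim_ definition above) =====
theorem generate_hex_row_combinations_py_spec : Claim_equal_generate_hex_row_combinations_py := by
  intro n _
  exact pv_main n
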